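-- pv_equiv track=rewrite | github.com/saimanojk1/LGG | MLAss1.py | LGG_Set
-- ===== SOURCE A (Python) =====
-- def LGG_Set(data, m):
--     h = []
--     #Initiating hypothesis with first instance from Data
--     for i in range(len(data[0])):
--         h.append([])
--         h[i].append(data[0][i])
--     for i in range(len(data)):
--         x = data[i]
--         if m == 2:
--             h = LGG_Conj(x, h)
--         elif m == 3:
--             h = LGG_Conj_ID(x, h)
--
--     return h
--
-- def LGG_Conj(x, y):
--     for i in range(len(x)):
--         if y[i] != []:
--             if x[i] not in set(y[i]):
--                 y[i] = []  #Conjunction of common literals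
--     return y
--
-- def LGG_Conj_ID(x, y):
--     for i in range(len(x)):
--         if x[i] not in set(y[i]):
--             y[i].append(x[i])  #Internal disjunction
--     return y
-- ===== SOURCE B (Python) =====
-- def LGG_Set(data, m):
--     first = data[0]
--     n = len(first)
--     if m == 2:
--         return [[first[i]] if all(x[i] == first[i] for x in data if i < len(x)) else []
--                 for i in range(n)]
--     if m == 3:
--         result = []
--         for i in range(n):
--             seen = []
--             for x in data:
--                 if i < len(x) and x[i] not in seen:
--                     seen.append(x[i])
--             result.append(seen)
--         return result
--     return [[first[i]] for i in range(n)]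
-- ===== Notes on version B (the rewrite author's own statement) =====
-- stated objective: alternative
-- what changed: Replaces A's row-by-row hypothesis accumulator (repeatedly rewriting h via LGG_Conj / LGG_Conj_ID) with a transposed, per-attribute-column computation that builds each result cell independently from column i of all rows.
import Mathlib
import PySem

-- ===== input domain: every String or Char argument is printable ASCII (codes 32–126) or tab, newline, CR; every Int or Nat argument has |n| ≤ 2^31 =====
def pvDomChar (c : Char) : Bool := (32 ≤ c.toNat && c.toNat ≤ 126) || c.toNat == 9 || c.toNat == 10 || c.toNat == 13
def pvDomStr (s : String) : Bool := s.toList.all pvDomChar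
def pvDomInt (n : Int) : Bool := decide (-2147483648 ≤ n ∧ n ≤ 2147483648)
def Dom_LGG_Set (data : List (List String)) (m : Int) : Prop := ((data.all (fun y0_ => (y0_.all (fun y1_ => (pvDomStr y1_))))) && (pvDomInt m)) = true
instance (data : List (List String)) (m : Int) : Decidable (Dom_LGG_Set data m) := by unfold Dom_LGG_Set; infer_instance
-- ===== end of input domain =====

-- B replaces A's row-by-row accumulator with an independent per-column (transposed)
-- computation; same asymptotic cost, different traversal structure.

-- ===== PORT A =====
-- `y[i]` is read with getD; inputs where Python's y[i] would raise are outside Pre_.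
def LGG_Conj (x : List String) (y : List (List String)) : List (List String) :=
  (List.range x.length).foldl (fun y i =>
    if y.getD i [] ≠ [] then
      if x.getD i "" ∉ y.getD i [] then y.set i [] else y
    else y) y

def LGG_Conj_ID (x : List String) (y : List (List String)) : List (List String) :=
  (List.range x.length).foldl (fun y i =>
    if x.getD i "" ∉ y.getD i [] then y.set i (y.getD i [] ++ [x.getD i ""]) else y) y

def LGG_Set (data : List (List String)) (m : Int) : List (List String) :=
  let d0 := data.headD []   -- data[0]; Python raises on empty data, excluded by Pre_
  let h0 := (List.range d0.length).foldl (fun h i => h ++ [[d0.getD i ""]]) []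
  data.foldl (fun h x =>
    if m = 2 then LGG_Conj x h
    else if m = 3 then LGG_Conj_ID x h
    else h) h0

-- ===== PORT B =====
def LGG_Set_alt (data : List (List String)) (m : Int) : List (List String) :=
  let first := data.headD []   -- data[0]; Python raises on empty data, excluded by Pre_
  let n := first.length
  if m = 2 then
    (List.range n).map (fun i =>
      if data.all (fun x => if i < x.length then x.getD i "" == first.getD i "" else true)
      then [first.getD i ""] else [])
  else if m = 3 then
    (List.range n).map (fun i =>
      data.foldl (fun seen x =>
        if i < x.length ∧ x.getD i "" ∉ seen then seen ++ [x.getD i ""] else seen) [])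
  else
    (List.range n).map (fun i => [first.getD i ""])

-- ===== PRECONDITION & SPEC =====
-- Pre_ excludes exactly the inputs where Python A raises IndexError: empty data
-- (data[0]), and, for m = 2 or 3, a row longer than data[0] (y[i] out of range).
def Pre_LGG_Set (data : List (List String)) (m : Int) : Prop :=
  data ≠ [] ∧ ((m = 2 ∨ m = 3) → ∀ x ∈ data, x.length ≤ (data.headD []).length)
instance (data : List (List String)) (m : Int) : Decidable (Pre_LGG_Set data m) := by
  unfold Pre_LGG_Set; infer_instance

def pvWitness_LGG_Set : List (List String) × Int := ([["a", "b"], ["a", "c"]], 2)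

def Spec_LGG_Set (data : List (List String)) (m : Int) (out : List (List String)) : Prop := out = LGG_Set_alt data m
instance (data : List (List String)) (m : Int) (out : List (List String)) : Decidable (Spec_LGG_Set data m out) := by unfold Spec_LGG_Set; infer_instance

-- ===== CLAIM (what is proved, stated in full; the proofs are below) =====
def Claim_equal_LGG_Set : Prop := ∀ (data : List (List String)) (m : Int), Dom_LGG_Set data m → Pre_LGG_Set data m → Spec_LGG_Set data m (LGG_Set data m)

-- ===== LEMMAS AND PROOFS =====

-- pointwise (per-column) steps of A's two conjunction passes
def pstep2 (i : ℕ) (v : List String) (x : List String) : List String :=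
  if i < x.length then (if v ≠ [] ∧ x.getD i "" ∉ v then [] else v) else v

def pstep3 (i : ℕ) (v : List String) (x : List String) : List String :=
  if i < x.length ∧ x.getD i "" ∉ v then v ++ [x.getD i ""] else v

theorem length_foldl_pres {β : Type} (f : List (List String) → β → List (List String))
    (hf : ∀ y b, (f y b).length = y.length) :
    ∀ (l : List β) (y : List (List String)), (l.foldl f y).length = y.length := by
  intro l
  induction l with
  | nil => intro y; rfl
  | cons b l ih => intro y; simp [List.foldl_cons, ih, hf]

theorem length_conj (x : List String) (y : List (List String)) :
    (LGG_Conj x y).length = y.length := by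
  unfold LGG_Conj
  apply length_foldl_pres
  intro y i
  split_ifs <;> simp

theorem length_conj_id (x : List String) (y : List (List String)) :
    (LGG_Conj_ID x y).length = y.length := by
  unfold LGG_Conj_ID
  apply length_foldl_pres
  intro y i
  split_ifs <;> simp

theorem getD_set_ne (y : List (List String)) (i j : ℕ) (v : List String) (h : i ≠ j) :
    (y.set j v)[i]?.getD [] = y[i]?.getD [] := by
  rw [List.getElem?_set_ne (by omega : j ≠ i)]

-- the fold over range n touched position i iff i < n, and only via its own step
theorem foldl_range_getD (f : List (List String) → ℕ → List (List String))
    (g : ℕ → List String → List String)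
    (hlen : ∀ y j, (f y j).length = y.length)
    (hself : ∀ y j, j < y.length → (f y j).getD j [] = g j (y.getD j []))
    (hne : ∀ y j i, i ≠ j → (f y j).getD i [] = y.getD i []) :
    ∀ (n : ℕ) (y : List (List String)) (i : ℕ), i < y.length →
      ((List.range n).foldl f y).getD i [] =
        if i < n then g i (y.getD i []) else y.getD i [] := by
  intro n
  induction n with
  | zero => intro y i _; simp
  | succ n ih =>
    intro y i hi
    rw [List.range_succ, List.foldl_append]
    simp only [List.foldl_cons, List.foldl_nil]
    rcases eq_or_ne i n with rfl | hne'
    · rw [hself _ _ (by rw [length_foldl_pres f hlen]; exact hi)]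
      rw [ih y i hi]
      simp
    · rw [hne _ _ _ hne', ih y i hi]
      simp only [show (i < n + 1) ↔ (i < n) from by omega]

theorem conj_getD (x : List String) (y : List (List String)) (i : ℕ) (hi : i < y.length) :
    (LGG_Conj x y).getD i [] = pstep2 i (y.getD i []) x := by
  have key := foldl_range_getD
      (fun y j => if y.getD j [] ≠ [] then if x.getD j "" ∉ y.getD j [] then y.set j [] else y else y)
      (fun j v => if v ≠ [] ∧ x.getD j "" ∉ v then [] else v)
      (by intro y j; dsimp only; split_ifs <;> simp)
      (by intro y j hj; dsimp only
          simp only [List.getD_eq_getElem?_getD]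
          split_ifs <;> simp_all)
      (by intro y j i hne; dsimp only
          simp only [List.getD_eq_getElem?_getD]
          split_ifs <;> simp_all [getD_set_ne _ _ _ _ hne])
      x.length y i hi
  unfold LGG_Conj pstep2
  rw [key]

theorem conj_id_getD (x : List String) (y : List (List String)) (i : ℕ) (hi : i < y.length) :
    (LGG_Conj_ID x y).getD i [] = pstep3 i (y.getD i []) x := by
  have key := foldl_range_getD
      (fun y j => if x.getD j "" ∉ y.getD j [] then y.set j (y.getD j [] ++ [x.getD j ""]) else y)
      (fun j v => if x.getD j "" ∉ v then v ++ [x.getD j ""] else v)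
      (by intro y j; dsimp only; split_ifs <;> simp)
      (by intro y j hj; dsimp only
          simp only [List.getD_eq_getElem?_getD]
          split_ifs <;> simp_all)
      (by intro y j i hne; dsimp only
          simp only [List.getD_eq_getElem?_getD]
          split_ifs <;> simp_all [getD_set_ne _ _ _ _ hne])
      x.length y i hi
  unfold LGG_Conj_ID pstep3
  rw [key]
  by_cases h1 : x.getD i "" ∉ y.getD i [] <;> by_cases h2 : i < x.length <;> simp [h2]

-- A's row loop, viewed at a single column i
theorem rows_fold_getD_conj (rows : List (List String)) :
    ∀ (h : List (List String)) (i : ℕ), i < h.length →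
      (rows.foldl (fun h x => LGG_Conj x h) h).getD i [] =
        rows.foldl (pstep2 i) (h.getD i []) := by
  induction rows with
  | nil => intro h i _; rfl
  | cons x rows ih =>
    intro h i hi
    simp only [List.foldl_cons]
    rw [ih _ i (by rw [length_conj]; exact hi), conj_getD _ _ _ hi]

theorem rows_fold_getD_conj_id (rows : List (List String)) :
    ∀ (h : List (List String)) (i : ℕ), i < h.length →
      (rows.foldl (fun h x => LGG_Conj_ID x h) h).getD i [] =
        rows.foldl (pstep3 i) (h.getD i []) := by
  induction rows with
  | nil => intro h i _; rfl
  | cons x rows ih =>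
    intro h i hi
    simp only [List.foldl_cons]
    rw [ih _ i (by rw [length_conj_id]; exact hi), conj_id_getD _ _ _ hi]

theorem pstep2_fold_nil (i : ℕ) (rows : List (List String)) :
    rows.foldl (pstep2 i) [] = [] := by
  induction rows with
  | nil => rfl
  | cons x rows ih => simpa [pstep2] using ih

-- closed form of the per-column m = 2 fold, matching B's `all` test
theorem pstep2_fold_closed (i : ℕ) (s : String) (rows : List (List String)) :
    rows.foldl (pstep2 i) [s] =
      if rows.all (fun x => if i < x.length then x.getD i "" == s else true)
      then [s] else [] := by
  induction rows with
  | nil => rfl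
  | cons x rows ih
  · simp only [List.foldl_cons, List.all_cons, Bool.and_eq_true]
    by_cases hx : i < x.length
    · by_cases he : x.getD i "" = s
      · rw [List.getD_eq_getElem _ _ hx] at he
        have h1 : pstep2 i [s] x = [s] := by simp [pstep2, hx, he]
        rw [h1, ih]; simp [hx, he]
      · rw [List.getD_eq_getElem _ _ hx] at he
        have h1 : pstep2 i [s] x = [] := by simp [pstep2, hx, he]
        rw [h1, pstep2_fold_nil]; simp [hx, he]
    · have h1 : pstep2 i [s] x = [s] := by simp [pstep2, hx]
      rw [h1, ih]; simp [hx]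

-- the initial hypothesis h0 is exactly the per-column singleton map
theorem init_eq_map (g : ℕ → String) :
    ∀ (n : ℕ) (acc : List (List String)),
      (List.range n).foldl (fun h i => h ++ [[g i]]) acc =
        acc ++ (List.range n).map (fun i => [g i]) := by
  intro n
  induction n with
  | zero => intro acc; simp
  | succ n ih => intro acc; rw [List.range_succ]; simp [List.foldl_append, ih]

theorem LGG_Set_spec : Claim_equal_LGG_Set := by
  intro data m _ hpre
  obtain ⟨hne, _⟩ := hpre
  unfold Spec_LGG_Set LGG_Set LGG_Set_alt
  simp only
  set d0 := data.headD [] with hd0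
  set n := d0.length with hn
  have hinit : (List.range n).foldl (fun h i => h ++ [[d0.getD i ""]]) [] =
      (List.range n).map (fun i => [d0.getD i ""]) := by
    simpa using init_eq_map (fun i => d0.getD i "") n []
  rcases eq_or_ne m 2 with hm2 | hm2
  · -- m = 2 : common-literal conjunction
    simp only [hm2, reduceIte]
    rw [hinit]
    have hlen : (data.foldl (fun h x => LGG_Conj x h)
        ((List.range n).map (fun i => [d0.getD i ""]))).length = n := by
      rw [length_foldl_pres _ (fun y b => length_conj b y)]; simp
    apply List.ext_getElem
    · simpa using hlen
    · intro i h1 h2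
      have hi : i < n := by simpa using h2
      have hiL : i < ((List.range n).map (fun j => [d0.getD j ""])).length := by simpa using hi
      have := rows_fold_getD_conj data ((List.range n).map (fun j => [d0.getD j ""])) i hiL
      rw [List.getD_eq_getElem _ _ h1] at this
      rw [this]
      have hstart : ((List.range n).map (fun j => [d0.getD j ""])).getD i [] = [d0.getD i ""] := by
        rw [List.getD_eq_getElem _ _ hiL]; simp
      rw [hstart, pstep2_fold_closed]
      simp
  · rcases eq_or_ne m 3 with hm3 | hm3
    · -- m = 3 : internal disjunction
      simp only [hm3, reduceIte, show ((3 : Int) = 2) = False from by norm_num, if_false]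
      rw [hinit]
      have hlen : (data.foldl (fun h x => LGG_Conj_ID x h)
          ((List.range n).map (fun i => [d0.getD i ""]))).length = n := by
        rw [length_foldl_pres _ (fun y b => length_conj_id b y)]; simp
      apply List.ext_getElem
      · simpa using hlen
      · intro i h1 h2
        have hi : i < n := by simpa using h2
        have hiL : i < ((List.range n).map (fun j => [d0.getD j ""])).length := by simpa using hi
        have := rows_fold_getD_conj_id data ((List.range n).map (fun j => [d0.getD j ""])) i hiL
        rw [List.getD_eq_getElem _ _ h1] at this
        rw [this]
        have hstart : ((List.range n).map (fun j => [d0.getD j ""])).getD i [] = [d0.getD i ""] := by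
          rw [List.getD_eq_getElem _ _ hiL]; simp
        rw [hstart]
        -- align A's start value [d0[i]] with B's start value [] : both agree after row 0
        obtain ⟨r0, rest, hdata⟩ : ∃ r0 rest, data = r0 :: rest := by
          cases data with
          | nil => exact absurd rfl hne
          | cons a l => exact ⟨a, l, rfl⟩
        have hd0r : d0 = r0 := by rw [hd0, hdata]; rfl
        have hilen : i < r0.length := by have h := hi; rw [hn, hd0r] at h; exact h
        simp only [List.getElem_map, List.getElem_range]
        rw [show (fun (seen : List String) (x : List String) =>
              if i < x.length ∧ x.getD i "" ∉ seen then seen ++ [x.getD i ""] else seen) =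
            pstep3 i from rfl]
        rw [hdata, hd0r]
        simp only [List.foldl_cons]
        have h1' : pstep3 i [r0.getD i ""] r0 = [r0.getD i ""] := by simp [pstep3]
        have h2' : pstep3 i [] r0 = [r0.getD i ""] := by simp [pstep3, hilen]
        rw [h1', h2']
    · -- other m : the row loop does nothing
      simp only [hm2, hm3, reduceIte]
      rw [hinit, List.foldl_fixed]
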